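-- pv_equiv track=rewrite | github.com/pshee-dev/Bookmark | backend/recommendations/my_source/embeddings/make_embeddings.py | make_bundle_text
-- ===== SOURCE A (Python) =====
-- from typing import List, Dict, Tuple
--
-- def make_bundle_text(
--         reviews: List[str],
--         max_reviews: int = 30,
--         max_chars: int = 6000,
-- ) -> str:
--     buf, total = [], 0
--     for r in reviews[:max_reviews]:
--         r = str(r).strip()
--         total += len(r)
--         if total > max_chars:
--             break
--         buf.append(r)
--     return "\n".join(buf)
-- ===== SOURCE B (Python) =====
-- from itertools import accumulate
-- from bisect import bisect_right
--
--
-- def make_bundle_text(reviews, max_reviews=30, max_chars=6000):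
--     stripped = [str(r).strip() for r in reviews[:max_reviews]]
--     sums = list(accumulate(len(s) for s in stripped))
--     k = bisect_right(sums, max_chars)
--     return "\n".join(stripped[:k])
-- ===== Notes on version B (the rewrite author's own statement) =====
-- stated objective: alternative
-- what changed: Replaced the fused accumulate-and-break loop by a map + prefix-sum table + binary search (bisect_right) to find how many stripped reviews fit, then one join of that slice.
import Mathlib
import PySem

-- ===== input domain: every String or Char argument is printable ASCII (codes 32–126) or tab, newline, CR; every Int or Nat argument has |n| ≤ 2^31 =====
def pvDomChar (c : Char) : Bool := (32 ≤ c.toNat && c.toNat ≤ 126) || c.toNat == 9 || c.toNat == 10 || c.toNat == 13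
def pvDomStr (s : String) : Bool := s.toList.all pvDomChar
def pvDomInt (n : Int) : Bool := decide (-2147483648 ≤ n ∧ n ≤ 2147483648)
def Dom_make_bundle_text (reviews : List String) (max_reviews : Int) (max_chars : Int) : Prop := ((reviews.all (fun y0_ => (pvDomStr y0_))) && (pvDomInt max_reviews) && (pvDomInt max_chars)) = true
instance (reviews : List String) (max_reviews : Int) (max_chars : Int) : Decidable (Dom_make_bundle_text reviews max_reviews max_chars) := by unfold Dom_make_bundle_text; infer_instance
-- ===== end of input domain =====

-- B replaces A's fused strip/accumulate/break loop by map + prefix sums + bisect_right + one join (alternative decomposition, same cost).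

-- ===== PORT A =====
-- the 'for r in reviews[:max_reviews]' loop with buf/total state and break
def make_bundle_text_loop (maxc : Int) : List String → Int → List String → List String
  | [], _, buf => buf
  | r :: rest, total, buf =>
    let r := PySem.Str.strip r
    let total := total + PySem.Str.len r
    if total > maxc then buf
    else make_bundle_text_loop maxc rest total (buf ++ [r])

def make_bundle_text (reviews : List String) (max_reviews : Int) (max_chars : Int) : String :=
  PySem.Str.join "\n" (make_bundle_text_loop max_chars (PySem.List.slice reviews none (some max_reviews)) 0 [])

-- ===== PORT B =====
-- itertools.accumulate of the lengths, running total t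
def accumFrom (t : Int) : List Int → List Int
  | [] => []
  | l :: ls => (t + l) :: accumFrom (t + l) ls

def make_bundle_text_alt (reviews : List String) (max_reviews : Int) (max_chars : Int) : String :=
  let stripped := (PySem.List.slice reviews none (some max_reviews)).map PySem.Str.strip
  let sums := accumFrom 0 (stripped.map PySem.Str.len)
  let k := PySem.List.bisectRight sums max_chars
  PySem.Str.join "\n" (stripped.take k)

-- ===== PRECONDITION & SPEC =====
def Spec_make_bundle_text (reviews : List String) (max_reviews : Int) (max_chars : Int) (out : String) : Prop := out = make_bundle_text_alt reviews max_reviews max_chars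
instance (reviews : List String) (max_reviews : Int) (max_chars : Int) (out : String) : Decidable (Spec_make_bundle_text reviews max_reviews max_chars out) := by unfold Spec_make_bundle_text; infer_instance

-- ===== CLAIM (what is proved, stated in full; the proofs are below) =====
def Claim_equal_make_bundle_text : Prop := ∀ (reviews : List String) (max_reviews : Int) (max_chars : Int), Dom_make_bundle_text reviews max_reviews max_chars → Spec_make_bundle_text reviews max_reviews max_chars (make_bundle_text reviews max_reviews max_chars)

-- ===== LEMMAS AND PROOFS =====

-- reference index: how many reviews A's loop keeps, starting from running total t
def cntRef (maxc : Int) : List Int → Int → Nat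
  | [], _ => 0
  | l :: ls, t => if t + l > maxc then 0 else 1 + cntRef maxc ls (t + l)

theorem loop_eq_take (maxc : Int) (xs : List String) (t : Int) (buf : List String) :
    make_bundle_text_loop maxc xs t buf
      = buf ++ (xs.map PySem.Str.strip).take (cntRef maxc (xs.map (fun s => PySem.Str.len (PySem.Str.strip s))) t) := by
  induction xs generalizing t buf with
  | nil => simp [make_bundle_text_loop, cntRef]
  | cons r rest ih =>
    simp only [make_bundle_text_loop, List.map_cons, cntRef]
    split_ifs with h
    · simp
    · rw [ih, Nat.add_comm]
      simp [List.take_succ_cons]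

theorem mem_accumFrom_ge (t : Int) (ls : List Int) (hls : ∀ l ∈ ls, 0 ≤ l) :
    ∀ x ∈ accumFrom t ls, t ≤ x := by
  induction ls generalizing t with
  | nil => simp [accumFrom]
  | cons l ls ih =>
    intro x hx
    simp only [accumFrom, List.mem_cons] at hx
    have h0 : 0 ≤ l := hls l (by simp)
    rcases hx with rfl | hx
    · omega
    · have := ih (t + l) (fun y hy => hls y (by simp [hy])) x hx
      omega

theorem accumFrom_length (t : Int) (ls : List Int) : (accumFrom t ls).length = ls.length := by
  induction ls generalizing t with
  | nil => rfl
  | cons l ls ih => simp [accumFrom, ih]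

theorem accumFrom_pairwise (t : Int) (ls : List Int) (hls : ∀ l ∈ ls, 0 ≤ l) :
    List.Pairwise (fun a b => a ≤ b) (accumFrom t ls) := by
  induction ls generalizing t with
  | nil => simp [accumFrom]
  | cons l ls ih =>
    simp only [accumFrom, List.pairwise_cons]
    refine ⟨fun x hx => mem_accumFrom_ge (t + l) ls (fun y hy => hls y (by simp [hy])) x hx,
      ih (t + l) (fun y hy => hls y (by simp [hy]))⟩

theorem cntRef_le_length (maxc : Int) (ls : List Int) (t : Int) :
    cntRef maxc ls t ≤ ls.length := by
  induction ls generalizing t with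
  | nil => simp [cntRef]
  | cons l ls ih =>
    simp only [cntRef]
    split_ifs
    · simp
    · have := ih (t + l)
      simp only [List.length_cons]
      omega

theorem cntRef_lt (maxc : Int) (ls : List Int) (t : Int) :
    ∀ (j : Nat) (hj : j < (accumFrom t ls).length), j < cntRef maxc ls t →
      (accumFrom t ls)[j] ≤ maxc := by
  induction ls generalizing t with
  | nil => simp [accumFrom]
  | cons l ls ih =>
    intro j hj hjc
    simp only [cntRef] at hjc
    split_ifs at hjc with h
    · omega
    · cases j with
      | zero => simpa [accumFrom] using (by omega : t + l ≤ maxc)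
      | succ j =>
        simp only [accumFrom] at hj ⊢
        simp only [List.getElem_cons_succ]
        exact ih (t + l) j (by simp only [List.length_cons] at hj; omega) (by omega)

theorem cntRef_ge (maxc : Int) (ls : List Int) (hls : ∀ l ∈ ls, 0 ≤ l) (t : Int) :
    ∀ (j : Nat) (hj : j < (accumFrom t ls).length), cntRef maxc ls t ≤ j →
      maxc < (accumFrom t ls)[j] := by
  induction ls generalizing t with
  | nil => simp [accumFrom]
  | cons l ls ih =>
    intro j hj hjc
    simp only [cntRef] at hjc
    simp only [accumFrom] at hj ⊢
    split_ifs at hjc with h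
    · -- everything from here on is ≥ t + l > maxc
      cases j with
      | zero => simpa using h
      | succ j =>
        simp only [List.getElem_cons_succ]
        have hj' : j < (accumFrom (t + l) ls).length := by
          simp only [List.length_cons] at hj; omega
        have hmem : (accumFrom (t + l) ls)[j] ∈ accumFrom (t + l) ls := List.getElem_mem hj'
        have := mem_accumFrom_ge (t + l) ls (fun y hy => hls y (by simp [hy])) _ hmem
        omega
    · cases j with
      | zero => omega
      | succ j =>
        simp only [List.getElem_cons_succ]
        exact ih (fun y hy => hls y (by simp [hy])) (t + l) j (by simp only [List.length_cons] at hj; omega) (by omega)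

theorem bisect_eq_cntRef (maxc : Int) (ls : List Int) (hls : ∀ l ∈ ls, 0 ≤ l) :
    PySem.List.bisectRight (accumFrom 0 ls) maxc = cntRef maxc ls 0 := by
  obtain ⟨hle, hlt, hgt⟩ := PySem.List.bisectRight_spec (accumFrom 0 ls) maxc
    (accumFrom_pairwise 0 ls hls)
  set k1 := PySem.List.bisectRight (accumFrom 0 ls) maxc with hk1
  set k2 := cntRef maxc ls 0 with hk2
  have hk2le : k2 ≤ (accumFrom 0 ls).length := by
    rw [accumFrom_length]; exact cntRef_le_length maxc ls 0
  rcases Nat.lt_trichotomy k1 k2 with h | h | h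
  · have h1 : k1 < (accumFrom 0 ls).length := lt_of_lt_of_le h hk2le
    have := cntRef_lt maxc ls 0 k1 h1 h
    have := hgt k1 h1 (le_refl _)
    omega
  · exact h
  · have h1 : k2 < (accumFrom 0 ls).length := lt_of_lt_of_le h hle
    have := cntRef_ge maxc ls hls 0 k2 h1 (le_refl _)
    have := hlt k2 h1 h
    omega

-- ===== VERDICT (by name: the statement is the Claim_ definition above) =====
theorem make_bundle_text_spec : Claim_equal_make_bundle_text := by
  intro reviews max_reviews max_chars _
  unfold Spec_make_bundle_text make_bundle_text make_bundle_text_alt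
  set xs := PySem.List.slice reviews none (some max_reviews) with hxs
  have hmap : (xs.map PySem.Str.strip).map PySem.Str.len
      = xs.map (fun s => PySem.Str.len (PySem.Str.strip s)) := by
    simp [List.map_map, Function.comp]
  have hnn : ∀ l ∈ (xs.map PySem.Str.strip).map PySem.Str.len, 0 ≤ l := by
    intro l hl
    simp only [List.mem_map] at hl
    obtain ⟨s, _, rfl⟩ := hl
    rw [PySem.Str.len_eq]
    exact Int.natCast_nonneg _
  rw [loop_eq_take]
  show PySem.Str.join "\n"
      ([] ++ (xs.map PySem.Str.strip).take
        (cntRef max_chars (xs.map (fun s => PySem.Str.len (PySem.Str.strip s))) 0))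
    = PySem.Str.join "\n" ((xs.map PySem.Str.strip).take
        (PySem.List.bisectRight (accumFrom 0 ((xs.map PySem.Str.strip).map PySem.Str.len)) max_chars))
  rw [bisect_eq_cntRef max_chars _ hnn, hmap]
  simp
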